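-- pv_equiv track=rewrite | github.com/Chris-Cameron/SNEL | message_finder.py | get_file_name
-- ===== SOURCE A (Python) =====
-- def get_file_name(num): #Gets the file name corresponding to a decimal number
--     if num == 0:
--         return "file_0000.txt" #This deals with an exception to the solution for adding leading zeroes below, where the use of "0" would cause leading zeroes to be added infinitely
--     name= "file_"
--     old_num = format(num,'x') #This converts integers into hexadecimal without the "0x" resulting from hex()
--     while num < 4096: #4096 and 16 are used to account for the amount characters that would be in a hexadecimal number
--         name += "0" #Adds a leading zero
--         num *= 16
--     name += str(old_num) + ".txt"
--     return name
-- ===== SOURCE B (Python) =====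
-- def get_file_name(num):
--     return "file_" + format(num, "04x") + ".txt"
-- ===== Notes on version B (the rewrite author's own statement) =====
-- stated objective: simpler
-- what changed: Replaced A's zero-special-case plus while-loop that multiplies num by 16 to count leading zeros with a single closed-form format(num,'04x') width specifier; Pre_ excludes negative num, on which A's loop never terminates.
import Mathlib
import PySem

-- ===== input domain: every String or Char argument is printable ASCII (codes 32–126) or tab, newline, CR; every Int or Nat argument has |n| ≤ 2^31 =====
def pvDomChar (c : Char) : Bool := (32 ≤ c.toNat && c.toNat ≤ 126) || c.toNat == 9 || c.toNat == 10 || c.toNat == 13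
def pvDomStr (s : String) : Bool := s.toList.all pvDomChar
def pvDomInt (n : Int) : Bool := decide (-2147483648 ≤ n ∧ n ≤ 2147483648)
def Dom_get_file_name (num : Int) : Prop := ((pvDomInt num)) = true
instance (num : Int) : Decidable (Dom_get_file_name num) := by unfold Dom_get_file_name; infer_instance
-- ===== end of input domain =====

-- B replaces A's zero special case and zero-counting while-loop by the closed-form
-- format(num,'04x') width specifier; Pre_ excludes negative num, where A's loop never terminates.


-- ===== PORT A =====

-- shared helper: Python's format(n,'x') digit list for a natural number (exact for n ≥ 0)
def hexDigit (n : Nat) : Char := if n < 10 then Char.ofNat (48 + n) else Char.ofNat (87 + n)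

def toHexNat (n : Nat) : List Char :=
  if _h : n < 16 then [hexDigit n]
  else toHexNat (n / 16) ++ [hexDigit (n % 16)]
decreasing_by exact Nat.div_lt_self (by omega) (by omega)

-- format(num,'x'): exact for all ints ('-' prefix for negatives)
def fmtHex (num : Int) : List Char :=
  if num < 0 then '-' :: toHexNat (-num).toNat else toHexNat num.toNat

-- A's while-loop; the fuel only makes the loop total — for 1 ≤ num at most 3 iterations run,
-- and for num ≤ 0 Python's loop never terminates (excluded by Pre_).
def padLoop (fuel : Nat) (num : Int) (name : String) : String :=
  match fuel with
  | 0 => name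
  | f + 1 => if num < 4096 then padLoop f (num * 16) (name ++ "0") else name

def get_file_name (num : Int) : String :=
  if num = 0 then "file_0000.txt"
  else
    let name := "file_"
    let old_num := fmtHex num
    let name := padLoop 13 num name
    name ++ String.ofList old_num ++ ".txt"

-- ===== PORT B =====

-- format(num,'04x'): zero-pad to total width 4 (sign counts toward the width)
def fmt04x (num : Int) : List Char :=
  if num < 0 then '-' :: (List.replicate (3 - (toHexNat (-num).toNat).length) '0' ++ toHexNat (-num).toNat)
  else List.replicate (4 - (toHexNat num.toNat).length) '0' ++ toHexNat num.toNat

def get_file_name_alt (num : Int) : String :=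
  "file_" ++ String.ofList (fmt04x num) ++ ".txt"

-- ===== PRECONDITION & SPEC =====
-- Pre_ excludes negative num: there A's while-loop multiplies num by 16 forever and never returns.
def Pre_get_file_name (num : Int) : Prop := 0 ≤ num
instance (num : Int) : Decidable (Pre_get_file_name num) := by unfold Pre_get_file_name; infer_instance
def pvWitness_get_file_name : Int := (7)

def Spec_get_file_name (num : Int) (out : String) : Prop := out = get_file_name_alt num
instance (num : Int) (out : String) : Decidable (Spec_get_file_name num out) := by unfold Spec_get_file_name; infer_instance

-- ===== CLAIM =====
def Claim_equal_get_file_name : Prop := ∀ (num : Int), Dom_get_file_name num → Pre_get_file_name num → Spec_get_file_name num (get_file_name num)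

-- ===== LEMMAS AND PROOFS =====

theorem toHexNat_len_lt16 (n : Nat) (h : n < 16) : (toHexNat n).length = 1 := by
  rw [toHexNat]; simp [h]

theorem toHexNat_len_ge16 (n : Nat) (h : 16 ≤ n) :
    (toHexNat n).length = (toHexNat (n / 16)).length + 1 := by
  rw [toHexNat]; simp [Nat.not_lt.mpr h]

theorem toHexNat_len_pos (n : Nat) : 1 ≤ (toHexNat n).length := by
  by_cases h : n < 16
  · simp [toHexNat_len_lt16 n h]
  · simp [toHexNat_len_ge16 n (by omega)]

theorem toHexNat_len_range2 (n : Nat) (h1 : 16 ≤ n) (h2 : n < 256) : (toHexNat n).length = 2 := by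
  rw [toHexNat_len_ge16 n h1, toHexNat_len_lt16 (n / 16) (by omega)]

theorem toHexNat_len_range3 (n : Nat) (h1 : 256 ≤ n) (h2 : n < 4096) : (toHexNat n).length = 3 := by
  rw [toHexNat_len_ge16 n (by omega), toHexNat_len_range2 (n / 16) (by omega) (by omega)]

theorem toHexNat_len_ge4 (n : Nat) (h : 4096 ≤ n) : 4 ≤ (toHexNat n).length := by
  rw [toHexNat_len_ge16 n (by omega), toHexNat_len_ge16 (n / 16) (by omega),
      toHexNat_len_ge16 (n / 16 / 16) (by omega)]
  have := toHexNat_len_pos (n / 16 / 16 / 16)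
  omega

theorem padLoop_succ (f : Nat) (num : Int) (name : String) :
    padLoop (f + 1) num name = if num < 4096 then padLoop f (num * 16) (name ++ "0") else name := rfl

theorem padLoop_ge (f : Nat) (num : Int) (name : String) (h : 4096 ≤ num) :
    padLoop f num name = name := by
  cases f with
  | zero => rfl
  | succ f => rw [padLoop_succ, if_neg (by omega)]

theorem get_file_name_spec' (num : Int) (h0 : 0 ≤ num) :
    get_file_name num = get_file_name_alt num := by
  rcases eq_or_lt_of_le h0 with h | h1
  · subst h
    apply String.toList_inj.mp
    simp [get_file_name, get_file_name_alt, fmt04x, toHexNat, hexDigit]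
  · have h1 : 1 ≤ num := h1
    have hpos : ¬ num < 0 := by omega
    have hne : num ≠ 0 := by omega
    unfold get_file_name get_file_name_alt fmtHex fmt04x
    rw [if_neg hne, if_neg hpos, if_neg hpos]
    simp only []
    apply String.toList_inj.mp
    by_cases c1 : num < 16
    · have e : padLoop 13 num "file_" = "file_000" := by
        show padLoop (12+1) num "file_" = _
        rw [padLoop_succ, if_pos (by omega)]
        show padLoop (11+1) (num*16) ("file_" ++ "0") = _
        rw [padLoop_succ, if_pos (by omega)]
        show padLoop (10+1) (num*16*16) (("file_" ++ "0") ++ "0") = _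
        rw [padLoop_succ, if_pos (by omega)]
        exact padLoop_ge _ _ _ (by nlinarith)
      rw [e, toHexNat_len_lt16 num.toNat (by omega)]
      simp [List.replicate]
    · by_cases c2 : num < 256
      · have e : padLoop 13 num "file_" = "file_00" := by
          show padLoop (12+1) num "file_" = _
          rw [padLoop_succ, if_pos (by omega)]
          show padLoop (11+1) (num*16) ("file_" ++ "0") = _
          rw [padLoop_succ, if_pos (by omega)]
          exact padLoop_ge _ _ _ (by nlinarith)
        rw [e, toHexNat_len_range2 num.toNat (by omega) (by omega)]
        simp [List.replicate]
      · by_cases c3 : num < 4096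
        · have e : padLoop 13 num "file_" = "file_0" := by
            show padLoop (12+1) num "file_" = _
            rw [padLoop_succ, if_pos (by omega)]
            exact padLoop_ge _ _ _ (by nlinarith)
          rw [e, toHexNat_len_range3 num.toNat (by omega) (by omega)]
          simp [List.replicate]
        · have e : padLoop 13 num "file_" = "file_" := padLoop_ge _ _ _ (by omega)
          have hl : 4 - (toHexNat num.toNat).length = 0 := by
            have := toHexNat_len_ge4 num.toNat (by omega)
            omega
          rw [e, hl]
          simp

-- ===== VERDICT =====
theorem get_file_name_spec : Claim_equal_get_file_name := by
  intro num _ hpre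
  exact get_file_name_spec' num hpre
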